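-- pv_equiv track=rewrite | github.com/Vodianoi/mine-sweeper | main/test.py | solve_lines
-- ===== SOURCE A (Python) =====
-- def solve_lines(lines):
--
--     solved_lines = []
--     for y in range(len(lines)):
--         solved_line = ""
--         line = lines[y]
--         for x in range(len(line)):
--             if is_mine(lines, x, y):
--                 solved_line += "*"
--             else:
--                 nb_mine = count_mines_around(x, y, lines)
--                 solved_line += str(nb_mine)
--
--         solved_lines.append(solved_line)
--     return solved_lines
--
-- def count_mines_around(x, y, lines):
--     nb_mine = 0
--     if is_mine(lines, x + 1, y + 1):
--         nb_mine += 1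
--     if is_mine(lines, x - 1, y + 1):
--         nb_mine += 1
--     if is_mine(lines, x + 1, y - 1):
--         nb_mine += 1
--     if is_mine(lines, x - 1, y - 1):
--         nb_mine += 1
--     if is_mine(lines, x - 1, y):
--         nb_mine += 1
--     if is_mine(lines, x + 1, y):
--         nb_mine += 1
--     if is_mine(lines, x, y + 1):
--         nb_mine += 1
--     if is_mine(lines, x, y - 1):
--         nb_mine += 1
--     return nb_mine
--
-- def is_mine(lines, x, y):
--     if y < 0 or y >= len(lines):
--         return False
--     line = lines[y]
--     if x < 0 or x >= len(line):
--         return False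
--     return line[x] == "*"
-- ===== SOURCE B (Python) =====
-- def solve_lines(lines):
--     res = []
--     for y, line in enumerate(lines):
--         out = []
--         for x, c in enumerate(line):
--             if c == '*':
--                 out.append('*')
--             else:
--                 lo = max(0, x - 1)
--                 n = 0
--                 for ry in (y - 1, y, y + 1):
--                     if 0 <= ry < len(lines):
--                         n += lines[ry][lo:x + 2].count('*')
--                 out.append(str(n))
--         res.append(''.join(out))
--     return res
-- ===== Notes on version B (the rewrite author's own statement) =====
-- stated objective: alternative
-- what changed: B replaces the eight explicit bounds-checked is_mine probes per cell by counting '*' in a 3-character slice of each of the up-to-three neighbouring rows (the cell itself, never a mine in that branch, contributes 0), and builds rows via enumerate/join instead of index loops with string accumulation.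
import Mathlib
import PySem

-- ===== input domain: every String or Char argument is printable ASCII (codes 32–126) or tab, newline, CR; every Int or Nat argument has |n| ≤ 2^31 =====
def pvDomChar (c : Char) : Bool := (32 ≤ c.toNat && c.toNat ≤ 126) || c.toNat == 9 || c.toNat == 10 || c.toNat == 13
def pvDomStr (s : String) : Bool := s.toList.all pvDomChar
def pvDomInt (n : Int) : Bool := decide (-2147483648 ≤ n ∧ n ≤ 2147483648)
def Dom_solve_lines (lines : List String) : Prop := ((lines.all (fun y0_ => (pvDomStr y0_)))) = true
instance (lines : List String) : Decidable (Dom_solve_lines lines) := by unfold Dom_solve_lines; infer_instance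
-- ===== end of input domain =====

-- B counts '*' in 3-char slices of the up-to-three neighbouring rows instead of A's eight bounds-checked probes per cell; same cost, alternative decomposition.

-- ===== PORT A =====
def isMine (lines : List String) (x y : Int) : Bool :=
  if y < 0 ∨ (lines.length : Int) ≤ y then false
  else
    match PySem.List.pyGet? lines y with
    | none => false
    | some line =>
      if x < 0 ∨ (line.toList.length : Int) ≤ x then false
      else
        match PySem.Str.pyGet? line x with
        | none => false
        | some c => c == '*'

def countMinesAround (x y : Int) (lines : List String) : Int :=
  let nb : Int := 0
  let nb := if isMine lines (x + 1) (y + 1) then nb + 1 else nb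
  let nb := if isMine lines (x - 1) (y + 1) then nb + 1 else nb
  let nb := if isMine lines (x + 1) (y - 1) then nb + 1 else nb
  let nb := if isMine lines (x - 1) (y - 1) then nb + 1 else nb
  let nb := if isMine lines (x - 1) y then nb + 1 else nb
  let nb := if isMine lines (x + 1) y then nb + 1 else nb
  let nb := if isMine lines x (y + 1) then nb + 1 else nb
  let nb := if isMine lines x (y - 1) then nb + 1 else nb
  nb

def solve_lines (lines : List String) : List String :=
  (List.range lines.length).foldl (fun solved (y : Nat) =>
    let line := PySem.List.pyGetD lines (y : Int) ""
    let row : List Char :=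
      (List.range line.toList.length).foldl (fun acc (x : Nat) =>
        if isMine lines (x : Int) (y : Int) then acc ++ ['*']
        else acc ++ PySem.Int.toChars (countMinesAround (x : Int) (y : Int) lines)) []
    solved ++ [String.ofList row]) []

-- ===== PORT B =====
-- Source B's `lines[ry][lo:x+2].count('*')`; the string slice/count is taken on the .toList side (PySem.Str.* are thin wrappers over these)
def cellCount (lines : List String) (y x : Nat) : Int :=
  [((y : Int) - 1), (y : Int), ((y : Int) + 1)].foldl (fun n ry =>
    if 0 ≤ ry ∧ ry < (lines.length : Int) then
      n + ((PySem.List.slice (PySem.List.pyGetD lines ry "").toList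
              (some (max 0 ((x : Int) - 1))) (some ((x : Int) + 2))).count '*' : Int)
    else n) 0

def solve_lines_alt (lines : List String) : List String :=
  (PySem.List.enumerate lines 0).map (fun yl =>
    String.ofList (((PySem.List.enumerate yl.2.toList 0).map (fun xc =>
      if xc.2 == '*' then ['*']
      else PySem.Int.toChars (cellCount lines yl.1.toNat xc.1.toNat))).flatten))

-- ===== PRECONDITION & SPEC =====
def Spec_solve_lines (lines : List String) (out : List String) : Prop := out = solve_lines_alt lines
instance (lines : List String) (out : List String) : Decidable (Spec_solve_lines lines out) := by unfold Spec_solve_lines; infer_instance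

-- ===== CLAIM (what is proved, stated in full; the proofs are below) =====
def Claim_equal_solve_lines : Prop := ∀ (lines : List String), Dom_solve_lines lines → Spec_solve_lines lines (solve_lines lines)

-- ===== LEMMAS AND PROOFS =====

-- 0/1 indicator of "character at index i (an Int) of cs is '*'"
def hit (cs : List Char) (i : Int) : Int :=
  if 0 ≤ i then (if cs[i.toNat]? = some '*' then 1 else 0) else 0

theorem hit_natCast (cs : List Char) (n : Nat) :
    hit cs (n : Int) = if cs[n]? = some '*' then 1 else 0 := by
  simp [hit]

theorem hit_neg_one (cs : List Char) : hit cs (-1) = 0 := by simp [hit]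

theorem take3_count (l : List Char) :
    ((l.take 3).count '*' : Int)
      = (if l[0]? = some '*' then 1 else 0) + (if l[1]? = some '*' then 1 else 0)
        + (if l[2]? = some '*' then 1 else 0) := by
  rcases l with _ | ⟨a, _ | ⟨b, _ | ⟨c, t⟩⟩⟩ <;>
    simp [List.count_cons] <;> split_ifs <;> simp_all

-- slice count = three hits
theorem slice_count_eq (cs : List Char) (x : Nat) :
    ((PySem.List.slice cs (some (max 0 ((x : Int) - 1))) (some ((x : Int) + 2))).count '*' : Int)
      = hit cs ((x : Int) - 1) + hit cs (x : Int) + hit cs ((x : Int) + 1) := by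
  cases x with
  | zero =>
    simp only [Nat.cast_zero, zero_sub, zero_add]
    rw [show max (0 : Int) (-1) = 0 from by decide]
    rw [show (some (0 : Int)) = some ((0 : Nat) : Int) from rfl,
        show (some (2 : Int)) = some ((2 : Nat) : Int) from rfl,
        PySem.List.slice_natCast]
    rw [hit_neg_one]
    rcases cs with _ | ⟨a, _ | ⟨b, t⟩⟩ <;>
      simp [hit, List.count_cons] <;> split_ifs <;> simp_all
  | succ k =>
    rw [show ((k + 1 : Nat) : Int) - 1 = ((k : Nat) : Int) from by push_cast; ring]
    rw [show max (0 : Int) ((k : Nat) : Int) = ((k : Nat) : Int) from by simp]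
    rw [show ((k + 1 : Nat) : Int) + 2 = ((k + 3 : Nat) : Int) from by push_cast; ring]
    rw [show ((k + 1 : Nat) : Int) + 1 = ((k + 2 : Nat) : Int) from by push_cast; ring]
    rw [PySem.List.slice_natCast]
    rw [show k + 3 - k = 3 from by omega]
    rw [take3_count, hit_natCast, hit_natCast, hit_natCast]
    simp [List.getElem?_drop]

-- isMine as a guarded hit
theorem isMine_eq_hit (lines : List String) (x' ry : Int) :
    (if isMine lines x' ry then (1 : Int) else 0)
      = if 0 ≤ ry ∧ ry < (lines.length : Int)
          then hit (PySem.List.pyGetD lines ry "").toList x' else 0 := by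
  unfold isMine
  by_cases h1 : 0 ≤ ry ∧ ry < (lines.length : Int)
  · obtain ⟨ha, hb⟩ := h1
    have e1 : (ry < 0 ∨ (lines.length : Int) ≤ ry) = False := eq_false (by omega)
    have e2 : ((0 : Int) ≤ ry ∧ ry < (lines.length : Int)) = True := eq_true ⟨ha, hb⟩
    simp only [e1, e2, if_false, if_true,
               PySem.List.pyGet?_eq_some_getElem _ ha hb,
               PySem.List.pyGetD_eq_getElem _ _ ha hb]
    set cs := lines[ry.toNat] with hcs
    by_cases h2 : 0 ≤ x' ∧ x' < (cs.toList.length : Int)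
    · obtain ⟨hx0, hx1⟩ := h2
      have e3 : (x' < 0 ∨ (cs.toList.length : Int) ≤ x') = False := eq_false (by omega)
      have hx1' : x'.toNat < cs.toList.length := by omega
      simp only [e3, if_false,
                 show PySem.Str.pyGet? cs x' = PySem.List.pyGet? cs.toList x' from rfl,
                 PySem.List.pyGet?_eq_some_getElem _ hx0 hx1]
      simp only [hit, if_pos hx0, List.getElem?_eq_getElem hx1']
      by_cases hstar : cs.toList[x'.toNat] = '*' <;> simp [hstar]
    · have e3 : (x' < 0 ∨ (cs.toList.length : Int) ≤ x') = True := eq_true (by omega)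
      simp only [e3, if_true, hit]
      by_cases hx0 : 0 ≤ x'
      · have : cs.toList[x'.toNat]? = none := by
          rw [List.getElem?_eq_none_iff]; omega
        simp [hx0, this]
      · simp [hx0]
  · have e1 : (ry < 0 ∨ (lines.length : Int) ≤ ry) = True := eq_true (by omega)
    simp only [e1, if_true, if_neg h1]
    simp

theorem add_bit (b : Bool) (n : Int) :
    (if b then n + 1 else n) = n + (if b then (1 : Int) else 0) := by
  cases b <;> simp

theorem cell_eq (lines : List String) (y x : Nat) (hy : y < lines.length)
    (hx : x < (lines[y]).toList.length) (hc : (lines[y]).toList[x]? ≠ some '*') :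
    countMinesAround (x : Int) (y : Int) lines = cellCount lines y x := by
  have hyD : PySem.List.pyGetD lines ((y : Nat) : Int) "" = lines[y] := by
    rw [PySem.List.pyGetD_eq_getElem _ _ (by positivity) (by exact_mod_cast hy)]
    simp
  have hyr : (0 ≤ ((y : Nat) : Int) ∧ ((y : Nat) : Int) < (lines.length : Int)) :=
    ⟨by positivity, by exact_mod_cast hy⟩
  have hself : hit (lines[y]).toList ((x : Nat) : Int) = 0 := by
    rw [hit_natCast]; simp [hc]
  unfold countMinesAround cellCount
  simp only [List.foldl, add_bit, isMine_eq_hit, slice_count_eq, zero_add]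
  rw [if_pos hyr, hyD]
  split_ifs <;> simp_all <;> ring

theorem isMine_nat (lines : List String) (k j : Nat) (hk : k < lines.length)
    (hj : j < (lines[k]).toList.length) :
    isMine lines (j : Int) (k : Int) = ((lines[k]).toList[j] == '*') := by
  unfold isMine
  have e1 : ((k : Int) < 0 ∨ (lines.length : Int) ≤ (k : Int)) = False :=
    eq_false (by push_neg; exact ⟨by positivity, by exact_mod_cast hk⟩)
  have hg1 : PySem.List.pyGet? lines ((k : Nat) : Int) = some lines[((k : Nat) : Int).toNat] :=
    PySem.List.pyGet?_eq_some_getElem lines (by positivity) (by exact_mod_cast hk)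
  simp only [e1, if_false, hg1, Int.toNat_natCast]
  have e2 : ((j : Int) < 0 ∨ ((lines[k]).toList.length : Int) ≤ (j : Int)) = False :=
    eq_false (by push_neg; exact ⟨by positivity, by exact_mod_cast hj⟩)
  have hg2 : PySem.List.pyGet? (lines[k]).toList ((j : Nat) : Int)
      = some (lines[k]).toList[((j : Nat) : Int).toNat] :=
    PySem.List.pyGet?_eq_some_getElem _ (by positivity) (by exact_mod_cast hj)
  simp only [e2, if_false,
             show PySem.Str.pyGet? lines[k] (j : Int)
                = PySem.List.pyGet? (lines[k]).toList (j : Int) from rfl,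
             hg2, Int.toNat_natCast]

theorem foldl_if_append {α : Type} (p : α → Bool) (f g : α → List Char) (l : List α)
    (acc : List Char) :
    l.foldl (fun acc x => if p x then acc ++ f x else acc ++ g x) acc
      = acc ++ l.flatMap (fun x => if p x then f x else g x) := by
  induction l generalizing acc with
  | nil => simp
  | cons a t ih =>
    simp only [List.foldl_cons, List.flatMap_cons, ih]
    by_cases hp : p a <;> simp [hp]

-- ===== VERDICT (by name: the statement is the Claim_ definition above) =====
theorem solve_lines_spec : Claim_equal_solve_lines := by
  intro lines _
  unfold Spec_solve_lines solve_lines solve_lines_alt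
  simp only [PySem.List.foldl_append_singleton_eq_map, List.nil_append]
  apply List.ext_getElem
  · simp [PySem.List.length_enumerate]
  · intro k hk1 hk2
    have hk : k < lines.length := by simpa using hk2
    simp only [List.getElem_map, List.getElem_range]
    rw [PySem.List.getElem_enumerate _ _ _ (by simpa [PySem.List.length_enumerate] using hk)]
    have hyD : PySem.List.pyGetD lines ((k : Nat) : Int) "" = lines[k] := by
      rw [PySem.List.pyGetD_eq_getElem _ _ (by omega) (by omega)]
      simp
    simp only [hyD, zero_add, Int.toNat_natCast]
    rw [foldl_if_append (fun (x : Nat) => isMine lines (x : Int) (k : Int))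
          (fun _ => ['*'])
          (fun (x : Nat) => PySem.Int.toChars (countMinesAround (x : Int) (k : Int) lines))]
    rw [List.nil_append, List.flatMap_def]
    congr 1
    congr 1
    apply List.ext_getElem
    · simp [PySem.List.length_enumerate]
    · intro j hj1 hj2
      have hj : j < (lines[k]).toList.length := by
        simpa [PySem.List.length_enumerate] using hj2
      simp only [List.getElem_map, List.getElem_range]
      rw [PySem.List.getElem_enumerate _ _ _ (by simpa [PySem.List.length_enumerate] using hj)]
      simp only [zero_add, Int.toNat_natCast]
      rw [isMine_nat lines k j hk hj]
      by_cases hstar : (lines[k]).toList[j] = '*'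
      · simp [hstar]
      · simp only [hstar, beq_iff_eq, if_neg hstar]
        rw [cell_eq lines k j hk hj (by rw [List.getElem?_eq_getElem hj]; simp [hstar])]
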